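-- pv_equiv track=rewrite | github.com/dev-jlpt18/GLC-Interpreter | gcl.py | concat_numbers
-- ===== SOURCE A (Python) =====
-- def concat_numbers(p):
--     concat = ""
--     range = len(p)-1
--     if (range != 0):
--         concat += "c_{54}"
--         n = p.pop()
--         id = get_number(n)
--         concat += "("+concat_numbers(p)+")"
--         concat += id
--         return concat
--     else:
--         n = p.pop(0)
--         id = get_number(n)
--         concat += id
--         return concat
--
-- def get_number(s):
--     numbers = ""
--     if s == 0:
--         numbers = "c_{42}"
--     elif s == 1:
--         numbers = "c_{43}"
--     elif s == 2:
--         numbers = "c_{44}"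
--     elif s == 3:
--         numbers = "c_{45}"
--     elif s == 4:
--        numbers =  "c_{46}"
--     elif s == 5:
--         numbers = "c_{47}"
--     elif s == 6:
--         numbers = "c_{48}"
--     elif s == 7:
--         numbers = "c_{49}"
--     elif s == 8:
--         numbers = "c_{50}"
--     else:
--         numbers = "c_{51}"
--     return numbers
-- ===== SOURCE B (Python) =====
-- def get_number(s):
--     table = {0: "c_{42}", 1: "c_{43}", 2: "c_{44}", 3: "c_{45}", 4: "c_{46}",
--              5: "c_{47}", 6: "c_{48}", 7: "c_{49}", 8: "c_{50}"}
--     return table.get(s, "c_{51}")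
--
-- def concat_numbers(p):
--     tails = []
--     while len(p) > 1:
--         tails.append(get_number(p.pop()))
--     result = get_number(p.pop(0))
--     for t in reversed(tails):
--         result = "c_{54}(" + result + ")" + t
--     return result
-- ===== Notes on version B (the rewrite author's own statement) =====
-- stated objective: alternative
-- what changed: Replaced A's recursion (pop last, recurse, wrap) by an explicit while-loop that collects the tail labels while popping from the end, then a fold over those labels in reverse order building the nested string; get_number is a dict lookup instead of an if-chain.
import Mathlib
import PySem

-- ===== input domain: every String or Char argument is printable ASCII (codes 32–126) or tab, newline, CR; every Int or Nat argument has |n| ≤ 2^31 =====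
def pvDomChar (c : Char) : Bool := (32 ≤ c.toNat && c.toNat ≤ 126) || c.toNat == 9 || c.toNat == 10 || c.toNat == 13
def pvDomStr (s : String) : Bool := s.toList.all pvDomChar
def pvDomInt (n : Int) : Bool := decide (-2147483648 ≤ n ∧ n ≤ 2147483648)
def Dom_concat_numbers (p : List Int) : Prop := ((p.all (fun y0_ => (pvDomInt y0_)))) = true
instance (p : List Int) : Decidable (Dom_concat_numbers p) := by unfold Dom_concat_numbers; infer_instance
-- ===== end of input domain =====

-- ===== PORT A =====
-- B changes A's recursive string construction into an explicit loop that first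
-- collects the tail labels back-to-front and then folds them (objective: alternative).
-- Note: the Python A (and B) empty their list argument in place; the equivalence here
-- is about the return value only.
def get_number (s : Int) : String :=
  if s = 0 then "c_{42}"
  else if s = 1 then "c_{43}"
  else if s = 2 then "c_{44}"
  else if s = 3 then "c_{45}"
  else if s = 4 then "c_{46}"
  else if s = 5 then "c_{47}"
  else if s = 6 then "c_{48}"
  else if s = 7 then "c_{49}"
  else if s = 8 then "c_{50}"
  else "c_{51}"

-- literal port of A's recursion; on [] Python's p.pop() raises IndexError (outside Pre_),
-- the port returns "" there
def concat_numbers : List Int → String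
  | [] => ""  -- range = -1 ≠ 0; p.pop() raises IndexError (outside Pre_)
  | x :: rest =>
    if ((x :: rest).length : Int) - 1 ≠ 0 then
      let n := (x :: rest).getLast!
      let id := get_number n
      "c_{54}" ++ ("(" ++ concat_numbers (x :: rest).dropLast ++ ")") ++ id
    else
      get_number x
termination_by p => p.length
decreasing_by simp [List.length_dropLast]

-- ===== PORT B =====
-- the while-loop of Source B: pop from the end while more than one element remains,
-- collecting get_number of each popped element
def cnCollect (p : List Int) (tails : List String) : List String × List Int :=
  if p.length > 1 then
    cnCollect p.dropLast (tails ++ [get_number p.getLast!])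
  else (tails, p)
termination_by p.length
decreasing_by simp [List.length_dropLast]; omega

def concat_numbers_alt (p : List Int) : String :=
  let (tails, rest) := cnCollect p []
  let base := match rest with
    | [] => ""  -- p.pop(0) raises IndexError
    | x :: _ => get_number x
  tails.reverse.foldl (fun r t => "c_{54}(" ++ r ++ ")" ++ t) base

-- ===== PRECONDITION & SPEC =====
-- Pre_ excludes the empty list, on which both Pythons raise IndexError (pop from empty list).
def Pre_concat_numbers (p : List Int) : Prop := p ≠ []
instance (p : List Int) : Decidable (Pre_concat_numbers p) := by unfold Pre_concat_numbers; infer_instance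
def pvWitness_concat_numbers : List Int := [3, 1, 4]

def Spec_concat_numbers (p : List Int) (out : String) : Prop := out = concat_numbers_alt p
instance (p : List Int) (out : String) : Decidable (Spec_concat_numbers p out) := by unfold Spec_concat_numbers; infer_instance

-- ===== CLAIM (what is proved, stated in full; the proofs are below) =====
def Claim_equal_concat_numbers : Prop := ∀ (p : List Int), Dom_concat_numbers p → Pre_concat_numbers p → Spec_concat_numbers p (concat_numbers p)

-- ===== LEMMAS AND PROOFS =====

theorem cn_single (x : Int) : concat_numbers [x] = get_number x := by
  simp [concat_numbers]

theorem cn_step (p : List Int) (h : 2 ≤ p.length) :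
    concat_numbers p = "c_{54}" ++ ("(" ++ concat_numbers p.dropLast ++ ")") ++ get_number p.getLast! := by
  match p, h with
  | a :: b :: t, _ =>
    have hc : ((a :: b :: t).length : Int) - 1 ≠ 0 := by simp; omega
    rw [concat_numbers, if_pos hc]

theorem step_eq (r t : String) :
    "c_{54}" ++ ("(" ++ r ++ ")") ++ t = "c_{54}(" ++ r ++ ")" ++ t := by
  simp [← String.append_assoc]

theorem cn_alt_from (p : List Int) (tails : List String) (hp : p ≠ []) :
    (cnCollect p tails).1.reverse.foldl (fun r t => "c_{54}(" ++ r ++ ")" ++ t)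
      (match (cnCollect p tails).2 with | [] => "" | x :: _ => get_number x)
    = tails.reverse.foldl (fun r t => "c_{54}(" ++ r ++ ")" ++ t) (concat_numbers p) := by
  induction hn : p.length using Nat.strong_induction_on generalizing p tails with
  | _ n ih =>
    match p, hp with
    | [x], _ =>
      rw [cnCollect]
      simp [cn_single]
    | a :: b :: t, _ =>
      have hlen : (a :: b :: t).length > 1 := by simp
      rw [cnCollect, if_pos hlen]
      have hdne : (a :: b :: t).dropLast ≠ [] := by
        cases t <;> simp [List.dropLast]
      have hdl : (a :: b :: t).dropLast.length < n := by
        rw [← hn, List.length_dropLast]; simp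
      rw [ih _ hdl _ _ hdne rfl, cn_step (a :: b :: t) (by simp)]
      rw [List.reverse_append, step_eq]
      simp

-- ===== VERDICT (by name: the statement is the Claim_ definition above) =====
theorem concat_numbers_spec : Claim_equal_concat_numbers := by
  intro p _ hp
  unfold Spec_concat_numbers concat_numbers_alt
  have := cn_alt_from p [] hp
  simp only [List.reverse_nil, List.foldl_nil] at this
  exact this.symm
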